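-- pv_equiv track=rewrite | github.com/dignissimus/chessemory | chessemory/process_data.py | number_of_pieces
-- ===== SOURCE A (Python) =====
-- PIECES = "rnbqkpRNBQKP"
--
-- def number_of_pieces(position):
--     npieces = 0
--     for character in position:
--         if character == " ":
--             break
--         if character in PIECES:
--             npieces += 1
--
--     return npieces
-- ===== SOURCE B (Python) =====
-- PIECES = "rnbqkpRNBQKP"
--
-- def number_of_pieces(position):
--     prefix = position.split(' ', 1)[0]
--     return sum(prefix.count(piece) for piece in PIECES)
-- ===== Notes on version B (the rewrite author's own statement) =====
-- stated objective: faster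
-- what changed: Inverts the traversal: instead of A's per-character early-exit scan testing membership in PIECES, B splits off the space-free prefix and loops over the 12 piece letters, counting each with str.count and summing (correct since PIECES has distinct letters).
import Mathlib
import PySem

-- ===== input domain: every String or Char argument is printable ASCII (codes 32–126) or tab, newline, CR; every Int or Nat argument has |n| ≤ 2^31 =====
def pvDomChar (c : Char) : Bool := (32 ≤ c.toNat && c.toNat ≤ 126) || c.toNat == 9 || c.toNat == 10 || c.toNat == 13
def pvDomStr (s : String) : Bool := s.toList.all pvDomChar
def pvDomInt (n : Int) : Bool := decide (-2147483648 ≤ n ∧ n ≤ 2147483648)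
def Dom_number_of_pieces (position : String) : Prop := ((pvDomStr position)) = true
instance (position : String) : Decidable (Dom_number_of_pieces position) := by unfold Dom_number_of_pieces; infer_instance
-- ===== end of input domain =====

-- B inverts the traversal: take the space-free prefix, then loop over the 12 piece letters,
-- counting each letter in the prefix and summing; a timing run measured B faster (C-level str.count).

-- ===== PORT A =====
def PIECES : String := "rnbqkpRNBQKP"

-- A's fused loop: break at the first space, increment on piece characters.
def npLoopA : List Char → Int → Int
  | [], npieces => npieces
  | c :: rest, npieces =>
    if c = ' ' then npieces
    else npLoopA rest (if PIECES.toList.contains c then npieces + 1 else npieces)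

def number_of_pieces (position : String) : Int :=
  npLoopA position.toList 0

-- ===== PORT B =====
-- position.split(' ', 1)[0] is the longest space-free prefix; prefix.count(piece) for a
-- single-character piece is exactly the character count (no overlap possible).
def number_of_pieces_alt (position : String) : Int :=
  let pre := position.toList.takeWhile (fun c => c ≠ ' ')
  PIECES.toList.foldl (fun acc piece => acc + (pre.count piece : Int)) 0

-- ===== PRECONDITION & SPEC =====
def Spec_number_of_pieces (position : String) (out : Int) : Prop := out = number_of_pieces_alt position
instance (position : String) (out : Int) : Decidable (Spec_number_of_pieces position out) := by unfold Spec_number_of_pieces; infer_instance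

-- ===== CLAIM (what is proved, stated in full; the proofs are below) =====
def Claim_equal_number_of_pieces : Prop := ∀ (position : String), Dom_number_of_pieces position → Spec_number_of_pieces position (number_of_pieces position)

-- ===== LEMMAS AND PROOFS =====
-- A's loop computes the indicator sum over the space-free prefix.
theorem npLoopA_eq (cs : List Char) : ∀ (n : Int),
    npLoopA cs n =
      n + ((cs.takeWhile (fun c => c ≠ ' ')).map
            (fun c => if PIECES.toList.contains c then (1 : Int) else 0)).sum := by
  induction cs with
  | nil => intro n; simp [npLoopA]
  | cons c rest ih =>
    intro n
    by_cases h : c = ' '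
    · simp [npLoopA, h, List.takeWhile]
    · simp [npLoopA, h, ih]
      split_ifs <;> ring

-- fold of additions = initial + sum of the mapped list
theorem foldl_add_counts (f : Char → Int) (l : List Char) : ∀ (acc : Int),
    l.foldl (fun a p => a + f p) acc = acc + (l.map f).sum := by
  induction l with
  | nil => intro acc; simp
  | cons p l ih => intro acc; simp [ih]; ring

-- summing the one-point indicator over a nodup list is membership
theorem sum_indicator_nodup (c : Char) (l : List Char) (hnd : l.Nodup) :
    (l.map (fun p => if p = c then (1 : Int) else 0)).sum =
      if l.contains c then 1 else 0 := by
  induction l with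
  | nil => simp
  | cons a l ih =>
    rcases List.nodup_cons.mp hnd with ⟨ha, hnd'⟩
    by_cases hac : a = c
    · subst hac
      have hca : l.contains a = false := by
        simpa [List.contains_eq_mem] using ha
      simp [ih hnd']
      exact ha
    · have : (a = c) = False := by simp [hac]
      simp [ih hnd', this]
      by_cases hc : c ∈ l <;> simp [hc, Ne.symm hac]

-- per-letter counts over nodup PIECES sum to the indicator sum over the prefix
theorem sum_counts_eq (pre : List Char) :
    (PIECES.toList.map (fun p => (pre.count p : Int))).sum =
      (pre.map (fun c => if PIECES.toList.contains c then (1 : Int) else 0)).sum := by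
  induction pre with
  | nil => simp
  | cons c pre ih =>
    have h1 : ∀ p : Char, ((c :: pre).count p : Int)
        = (pre.count p : Int) + (if p = c then (1 : Int) else 0) := by
      intro p
      by_cases h : p = c
      · simp [h]
      · have h2 : ¬ c = p := fun e => h e.symm
        simp [h, h2]
    calc (PIECES.toList.map (fun p => ((c :: pre).count p : Int))).sum
        = (PIECES.toList.map (fun p => (pre.count p : Int) + (if p = c then (1 : Int) else 0))).sum := by
          simp only [h1]
      _ = (PIECES.toList.map (fun p => (pre.count p : Int))).sum
            + (PIECES.toList.map (fun p => if p = c then (1 : Int) else 0)).sum := by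
          rw [← List.sum_map_add]
      _ = (pre.map (fun c => if PIECES.toList.contains c then (1 : Int) else 0)).sum
            + (if PIECES.toList.contains c then (1 : Int) else 0) := by
          rw [ih, sum_indicator_nodup c PIECES.toList (by decide)]
      _ = ((c :: pre).map (fun c => if PIECES.toList.contains c then (1 : Int) else 0)).sum := by
          simp [List.map_cons]; ring

-- ===== VERDICT (by name: the statement is the Claim_ definition above) =====
theorem number_of_pieces_spec : Claim_equal_number_of_pieces := by
  intro position _
  unfold Spec_number_of_pieces number_of_pieces number_of_pieces_alt
  rw [npLoopA_eq, foldl_add_counts, sum_counts_eq]
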